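-- pv_equiv track=rewrite | github.com/pypi-data/pypi-mirror-367 | packages/browse-to-test/browse_to_test-0.2.17-py3-none-any.whl/browse_to_test/core/processing/context_collector.py | _identify_frameworks_from_deps
-- ===== SOURCE A (Python) =====
-- from typing import Dict, List, Optional, Any, Union, Set
--
-- def _identify_frameworks_from_deps(dependencies: Dict[str, str]) -> List[str]:
--     """Identify frameworks from dependency list."""
--     frameworks = []
--     framework_indicators = {
--         'react': ['react', '@types/react'],
--         'playwright': ['playwright', '@playwright/test'],
--         'selenium': ['selenium'],
--     }
--
--     for framework, indicators in framework_indicators.items():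
--         for dep in dependencies:
--             if any(indicator in dep.lower() for indicator in indicators):
--                 if framework not in frameworks:
--                     frameworks.append(framework)
--                 break
--
--     return frameworks
-- ===== SOURCE B (Python) =====
-- def _identify_frameworks_from_deps(dependencies):
--     """Identify frameworks from dependency list."""
--     # '@types/react' contains 'react' and '@playwright/test' contains 'playwright',
--     # so one keyword per framework suffices; search a single newline-joined blob.
--     blob = "\n".join(dep.lower() for dep in dependencies)
--     return [fw for fw in ("react", "playwright", "selenium") if fw in blob]
-- ===== Notes on version B (the rewrite author's own statement) =====
-- stated objective: simpler
-- what changed: Replaced the nested per-framework/per-dependency scans over indicator lists by a single newline-joined lowercase blob of all dependency names searched once per framework keyword (the extra '@types/react'/'@playwright/test' indicators are redundant because they contain the base keyword), keeping the declared framework order by filtering a fixed tuple.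
import Mathlib
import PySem

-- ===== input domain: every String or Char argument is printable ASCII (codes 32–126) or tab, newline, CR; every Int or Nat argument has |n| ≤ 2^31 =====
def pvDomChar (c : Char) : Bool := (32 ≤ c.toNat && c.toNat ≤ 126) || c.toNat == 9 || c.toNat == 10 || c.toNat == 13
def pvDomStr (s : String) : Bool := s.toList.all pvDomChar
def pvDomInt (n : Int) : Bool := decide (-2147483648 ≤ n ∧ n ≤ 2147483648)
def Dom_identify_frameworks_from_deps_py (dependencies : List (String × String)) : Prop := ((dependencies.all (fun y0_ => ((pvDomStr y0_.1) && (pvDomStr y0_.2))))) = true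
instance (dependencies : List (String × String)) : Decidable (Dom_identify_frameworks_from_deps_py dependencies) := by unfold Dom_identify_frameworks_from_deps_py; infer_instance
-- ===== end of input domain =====

-- B drops the indicator lists (each extra indicator contains its framework keyword) and
-- searches a single newline-joined lowercase blob of all dependency names once per keyword,
-- filtering a fixed keyword tuple to keep the declared order (simpler; same return value).


-- ===== PORT A =====
def aTable : List (String × List String) :=
  [("react", ["react", "@types/react"]),
   ("playwright", ["playwright", "@playwright/test"]),
   ("selenium", ["selenium"])]

-- the inner 'for dep in dependencies: … break' loop of A: true iff it hits the break
def aScan (indicators : List String) : List (String × String) → Bool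
  | [] => false
  | d :: rest =>
    if indicators.any (fun ind => PySem.Str.isIn ind (PySem.Str.lower d.1)) then true
    else aScan indicators rest

def identify_frameworks_from_deps_py (dependencies : List (String × String)) : List String :=
  aTable.foldl (fun frameworks p =>
    if aScan p.2 dependencies then
      (if frameworks.contains p.1 then frameworks else frameworks ++ [p.1])
    else frameworks) []

-- ===== PORT B =====
def identify_frameworks_from_deps_py_alt (dependencies : List (String × String)) : List String :=
  let blob := PySem.Str.join "\n" (dependencies.map (fun d => PySem.Str.lower d.1))
  (["react", "playwright", "selenium"] : List String).filter (fun fw => PySem.Str.isIn fw blob)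

-- ===== PRECONDITION & SPEC =====
def Spec_identify_frameworks_from_deps_py (dependencies : List (String × String)) (out : List String) : Prop := out = identify_frameworks_from_deps_py_alt dependencies
instance (dependencies : List (String × String)) (out : List String) : Decidable (Spec_identify_frameworks_from_deps_py dependencies out) := by unfold Spec_identify_frameworks_from_deps_py; infer_instance

-- ===== CLAIM (what is proved, stated in full; the proofs are below) =====
def Claim_equal_identify_frameworks_from_deps_py : Prop := ∀ (dependencies : List (String × String)), Dom_identify_frameworks_from_deps_py dependencies → Spec_identify_frameworks_from_deps_py dependencies (identify_frameworks_from_deps_py dependencies)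

-- ===== LEMMAS AND PROOFS =====

lemma aScan_eq_any (inds : List String) (deps : List (String × String)) :
    aScan inds deps = deps.any (fun d => inds.any (fun ind => PySem.Str.isIn ind (PySem.Str.lower d.1))) := by
  induction deps with
  | nil => simp [aScan]
  | cons d rest ih =>
    simp only [aScan, List.any_cons, ih]
    cases h : inds.any (fun ind => PySem.Str.isIn ind (PySem.Str.lower d.1)) <;> simp

-- a separator character not occurring in kw cannot be crossed by a prefix occurrence
lemma prefix_sep (kw : List Char) (c : Char) (hc : c ∉ kw) :
    ∀ (l r : List Char), (kw <+: l ++ c :: r ↔ kw <+: l) := by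
  induction kw with
  | nil => intro l r; simp
  | cons k kw' ih =>
    intro l r
    cases l with
    | nil =>
      simp only [List.nil_append, List.cons_prefix_cons]
      constructor
      · rintro ⟨rfl, -⟩; exact absurd (List.mem_cons_self) hc
      · rintro h; exact absurd (List.prefix_nil.mp h) (by simp)
    | cons x l' =>
      simp only [List.cons_append, List.cons_prefix_cons,
        ih (fun h => hc (List.mem_cons_of_mem _ h)) l' r]

-- nor by an infix occurrence: kw is infix of l ++ c :: r iff it is infix of l or of r
lemma infix_sep (kw : List Char) (c : Char) (hc : c ∉ kw) :
    ∀ (l r : List Char), (kw <:+: l ++ c :: r ↔ kw <:+: l ∨ kw <:+: r) := by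
  intro l r
  induction l with
  | nil =>
    rw [List.nil_append, List.infix_cons_iff,
      show (c :: r) = [] ++ c :: r from rfl, prefix_sep kw c hc [] r]
    simp [List.prefix_nil, List.infix_nil]
  | cons x l' ih =>
    rw [List.cons_append, List.infix_cons_iff, ← List.cons_append,
      prefix_sep kw c hc (x :: l') r, ih, List.infix_cons_iff]
    tauto

-- one separator step, as a Bool equation
lemma isIn_sep (kw : List Char) (hc : '\n' ∉ kw) (l r : List Char) :
    PySem.Chars.isIn kw (l ++ '\n' :: r) = (PySem.Chars.isIn kw l || PySem.Chars.isIn kw r) := by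
  rw [Bool.eq_iff_iff, PySem.Chars.isIn_iff_infix, Bool.or_eq_true,
    PySem.Chars.isIn_iff_infix, PySem.Chars.isIn_iff_infix, infix_sep kw '\n' hc]

-- searching the '\n'-joined blob = searching each part (kw nonempty, no '\n' in kw)
lemma isIn_join (kw : List Char) (hne : kw ≠ []) (hc : '\n' ∉ kw) :
    ∀ (parts : List (List Char)),
      PySem.Chars.isIn kw (PySem.Chars.join ['\n'] parts) = parts.any (fun p => PySem.Chars.isIn kw p) := by
  intro parts
  induction parts with
  | nil =>
    simp only [PySem.Chars.join_nil, List.any_nil]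
    rw [PySem.Chars.isIn_eq_false_iff]
    simpa [List.infix_nil] using hne
  | cons a rest ih =>
    cases rest with
    | nil => simp [PySem.Chars.join_singleton]
    | cons b rest' =>
      rw [PySem.Chars.join_cons_cons, List.any_cons, ← ih,
        List.append_assoc, List.singleton_append, isIn_sep kw hc]

-- an indicator that contains the framework keyword adds nothing to the per-dep test
lemma indicator_redundant (kw big low : String) (h : kw.toList <:+: big.toList) :
    (PySem.Str.isIn kw low || PySem.Str.isIn big low) = PySem.Str.isIn kw low := by
  rcases h2 : PySem.Str.isIn big low with _ | _
  · simp
  · rw [PySem.Str.isIn_iff_infix] at h2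
    have hk := h.trans h2
    rw [← PySem.Chars.isIn_iff_infix] at hk
    simp [hk]

-- B's test for keyword fw equals 'some dep's lowercased name contains fw'
lemma blob_any (fw : String) (hne : fw.toList ≠ []) (hc : '\n' ∉ fw.toList)
    (deps : List (String × String)) :
    PySem.Str.isIn fw (PySem.Str.join "\n" (deps.map (fun d => PySem.Str.lower d.1)))
      = deps.any (fun d => PySem.Str.isIn fw (PySem.Str.lower d.1)) := by
  rw [show PySem.Str.isIn fw (PySem.Str.join "\n" (deps.map (fun d => PySem.Str.lower d.1)))
        = PySem.Chars.isIn fw.toList (PySem.Str.join "\n" (deps.map (fun d => PySem.Str.lower d.1))).toList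
      from by simp,
     PySem.Str.toList_join]
  have : (deps.map (fun d => PySem.Str.lower d.1)).map String.toList
       = deps.map (fun d => (PySem.Str.lower d.1).toList) := by simp
  rw [this]
  have hsep : "\n".toList = ['\n'] := rfl
  rw [hsep, isIn_join fw.toList hne hc, List.any_map]
  simp [Function.comp_def]

-- ===== VERDICT (by name: the statement is the Claim_ definition above) =====
theorem identify_frameworks_from_deps_py_spec : Claim_equal_identify_frameworks_from_deps_py := by
  intro deps _
  unfold Spec_identify_frameworks_from_deps_py identify_frameworks_from_deps_py identify_frameworks_from_deps_py_alt
  have b1 := blob_any "react" (by decide) (by decide) deps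
  have b2 := blob_any "playwright" (by decide) (by decide) deps
  have b3 := blob_any "selenium" (by decide) (by decide) deps
  have a1 : deps.any (fun d => (["react", "@types/react"] : List String).any (fun ind => PySem.Str.isIn ind (PySem.Str.lower d.1)))
          = deps.any (fun d => PySem.Str.isIn "react" (PySem.Str.lower d.1)) := by
    congr 1; funext d
    simpa using indicator_redundant "react" "@types/react" (PySem.Str.lower d.1) (by decide)
  have a2 : deps.any (fun d => (["playwright", "@playwright/test"] : List String).any (fun ind => PySem.Str.isIn ind (PySem.Str.lower d.1)))
          = deps.any (fun d => PySem.Str.isIn "playwright" (PySem.Str.lower d.1)) := by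
    congr 1; funext d
    simpa using indicator_redundant "playwright" "@playwright/test" (PySem.Str.lower d.1) (by decide)
  have a3 : deps.any (fun d => (["selenium"] : List String).any (fun ind => PySem.Str.isIn ind (PySem.Str.lower d.1)))
          = deps.any (fun d => PySem.Str.isIn "selenium" (PySem.Str.lower d.1)) := by
    congr 1; funext d; simp
  simp only [aTable, List.foldl_cons, List.foldl_nil, aScan_eq_any,
    List.filter_cons, List.filter_nil, b1, b2, b3, a1, a2, a3]
  cases c1 : deps.any (fun d => PySem.Str.isIn "react" (PySem.Str.lower d.1)) <;>
  cases c2 : deps.any (fun d => PySem.Str.isIn "playwright" (PySem.Str.lower d.1)) <;>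
  cases c3 : deps.any (fun d => PySem.Str.isIn "selenium" (PySem.Str.lower d.1)) <;>
  simp
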